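-- pv_equiv track=rewrite | github.com/bbence84/c64vibe | utils/c64_syntax_checker.py | _normalize_ops
-- ===== SOURCE A (Python) =====
-- from typing import List, Dict, Tuple, Optional
--
-- def _normalize_ops(tokens: List[str]) -> List[str]:
--     # Merge two-character comparison operators if tokenized separately (e.g., '>' '=')
--     merged = []
--     i = 0
--     while i < len(tokens):
--         t = tokens[i]
--         u = t.upper()
--         nxt = tokens[i+1] if i+1 < len(tokens) else None
--         pair = (u + (nxt.upper() if nxt else '')) if nxt else None
--         if nxt and pair in ('<=','>=','<>'):
--             merged.append(pair)
--             i += 2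
--         else:
--             merged.append(t)
--             i += 1
--     return merged
-- ===== SOURCE B (Python) =====
-- from typing import List
--
-- def _normalize_ops(tokens: List[str]) -> List[str]:
--     # Single forward pass using the output list as a stack: merge the current
--     # token onto the previously emitted one when together they form a
--     # two-character comparison operator.
--     merged = []
--     for t in tokens:
--         if merged and (pair := merged[-1].upper() + t.upper()) in ('<=', '>=', '<>'):
--             merged[-1] = pair
--         else:
--             merged.append(t)
--     return merged
-- ===== Notes on version B (the rewrite author's own statement) =====
-- stated objective: simpler
-- what changed: Replaces A's index-based while loop with look-ahead and i += 2 skipping by a single for-loop that treats the output list as a stack and merges each token backwards onto the last emitted one.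
-- outside the precondition, e.g. on _normalize_ops(['<=', '']): A returns ['<=', ''], B returns ['<=']
import Mathlib
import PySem

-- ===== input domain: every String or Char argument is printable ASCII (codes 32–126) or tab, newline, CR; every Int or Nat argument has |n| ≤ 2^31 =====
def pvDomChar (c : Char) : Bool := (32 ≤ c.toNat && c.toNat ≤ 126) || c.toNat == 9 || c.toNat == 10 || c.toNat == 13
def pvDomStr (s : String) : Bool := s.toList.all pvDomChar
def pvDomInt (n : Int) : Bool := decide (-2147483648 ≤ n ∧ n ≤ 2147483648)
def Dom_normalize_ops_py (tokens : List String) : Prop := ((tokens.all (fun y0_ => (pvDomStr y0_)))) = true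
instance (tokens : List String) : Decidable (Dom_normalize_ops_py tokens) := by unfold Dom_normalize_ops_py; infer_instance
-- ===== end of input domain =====

-- B replaces A's index/look-ahead while loop by a forward stack pass that merges each
-- token backwards onto the last emitted one (objective: simpler decomposition).

-- ===== PORT A =====
-- while loop over index i, stepping by 2 after a merge: structural recursion on the
-- remaining tokens.  Python's 'nxt and pair in (...)' is False when nxt == '' (falsy),
-- hence the explicit nxt ≠ "" conjunct; u/pair are inlined.
def normalize_ops_py : List String → List String
  | [] => []
  | [t] => [t]
  | t :: nxt :: rest =>
      if nxt ≠ "" ∧ (PySem.Str.upper t ++ PySem.Str.upper nxt = "<=" ∨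
                     PySem.Str.upper t ++ PySem.Str.upper nxt = ">=" ∨
                     PySem.Str.upper t ++ PySem.Str.upper nxt = "<>") then
        (PySem.Str.upper t ++ PySem.Str.upper nxt) :: normalize_ops_py rest
      else
        t :: normalize_ops_py (nxt :: rest)

-- ===== PORT B =====
-- one loop body of Source B: merge t onto the last emitted token if they form an operator
def pvStepB (out : List String) (t : String) : List String :=
  match out.getLast? with
  | some last =>
      let pair := PySem.Str.upper last ++ PySem.Str.upper t
      if pair = "<=" ∨ pair = ">=" ∨ pair = "<>" then out.dropLast ++ [pair]
      else out ++ [t]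
  | none => out ++ [t]

def normalize_ops_py_alt (tokens : List String) : List String :=
  tokens.foldl pvStepB []

-- ===== PRECONDITION & SPEC =====
def pvIsOp (s : String) : Prop := s = "<=" ∨ s = ">=" ∨ s = "<>"

-- Pre_ excludes lists in which an empty-string token immediately follows operator
-- material (a token whose uppercase is '<='/'>='/'<>', or an adjacent pair whose
-- uppercases concatenate to one): there Python's truthiness test ('nxt and …') makes
-- A keep an empty token that B's backward merge swallows — a corner no tokenizer
-- produces and no one would specify; B does the natural thing there.
def Pre_normalize_ops_py (tokens : List String) : Prop :=
  (∀ p ∈ tokens.zip tokens.tail, pvIsOp (PySem.Str.upper p.1) → p.2 ≠ "") ∧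
  (∀ q ∈ (tokens.zip tokens.tail).zip tokens.tail.tail,
      pvIsOp (PySem.Str.upper q.1.1 ++ PySem.Str.upper q.1.2) → q.2 ≠ "")
instance (tokens : List String) : Decidable (Pre_normalize_ops_py tokens) := by
  unfold Pre_normalize_ops_py; unfold pvIsOp; infer_instance

def pvWitness_normalize_ops_py : List String := ["x", "<", "=", "y"]

def Spec_normalize_ops_py (tokens : List String) (out : List String) : Prop := out = normalize_ops_py_alt tokens
instance (tokens : List String) (out : List String) : Decidable (Spec_normalize_ops_py tokens out) := by unfold Spec_normalize_ops_py; infer_instance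

-- ===== CLAIM (what is proved, stated in full; the proofs are below) =====
def Claim_equal_normalize_ops_py : Prop := ∀ (tokens : List String), Dom_normalize_ops_py tokens → Pre_normalize_ops_py tokens → Spec_normalize_ops_py tokens (normalize_ops_py tokens)

-- ===== LEMMAS AND PROOFS =====

theorem pv_upper_eq_empty {s : String} (h : PySem.Str.upper s = "") : s = "" := by
  have h1 : (PySem.Str.upper s).toList = ([] : List Char) := by rw [h]; rfl
  rw [PySem.Str.toList_upper] at h1
  apply String.toList_eq_nil_iff.mp
  cases hs : s.toList with
  | nil => rfl
  | cons c cs => rw [hs] at h1; simp [PySem.Chars.upper] at h1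

-- after a merge, the merged two-character operator can never merge again with a
-- nonempty following token
theorem pv_blocked (p t : String)
    (hp : p = "<=" ∨ p = ">=" ∨ p = "<>") (ht : t ≠ "") :
    ¬ (PySem.Str.upper p ++ PySem.Str.upper t = "<=" ∨
       PySem.Str.upper p ++ PySem.Str.upper t = ">=" ∨
       PySem.Str.upper p ++ PySem.Str.upper t = "<>") := by
  intro hcon
  have hup : PySem.Str.upper p = p := by
    rcases hp with h | h | h <;> subst h <;> rfl
  rw [hup] at hcon
  have hlen : (p ++ PySem.Str.upper t).toList.length = 2 := by
    rcases hcon with h | h | h <;> rw [h] <;> rfl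
  have hplen : p.toList.length = 2 := by
    rcases hp with h | h | h <;> subst h <;> rfl
  have happ : (p ++ PySem.Str.upper t).toList = p.toList ++ (PySem.Str.upper t).toList :=
    String.toList_append
  rw [happ, List.length_append, hplen] at hlen
  have hnil : (PySem.Str.upper t).toList = [] := List.eq_nil_of_length_eq_zero (by omega)
  exact ht (pv_upper_eq_empty (String.toList_eq_nil_iff.mp hnil))

theorem pv_getLast?_concat {α : Type} (xs : List α) (x : α) :
    (xs ++ [x]).getLast? = some x := by
  simp

-- decomposing Pre_ over a cons: the head constraints plus Pre_ of the tail
theorem pv_pre_cons {x y : String} {rest : List String}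
    (h : Pre_normalize_ops_py (x :: y :: rest)) :
    Pre_normalize_ops_py (y :: rest) ∧
    (pvIsOp (PySem.Str.upper x) → y ≠ "") ∧
    (∀ z, rest.head? = some z →
        pvIsOp (PySem.Str.upper x ++ PySem.Str.upper y) → z ≠ "") := by
  obtain ⟨h2, h3⟩ := h
  refine ⟨⟨?_, ?_⟩, ?_, ?_⟩
  · intro p hp hop
    exact h2 p (by simpa using Or.inr (by simpa using hp)) hop
  · intro q hq hop
    apply h3 q _ hop
    cases rest with
    | nil => simp at hq
    | cons z rs => simpa using Or.inr (by simpa using hq)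
  · intro hop
    exact h2 (x, y) (by simp) hop
  · intro z hz hop
    apply h3 ((x, y), z) _ hop
    cases rest with
    | nil => simp at hz
    | cons z' rs =>
        simp at hz
        subst hz
        simp
theorem pv_pre_tail {x : String} {ts : List String}
    (h : Pre_normalize_ops_py (x :: ts)) : Pre_normalize_ops_py ts := by
  cases ts with
  | nil => exact ⟨by simp, by simp⟩
  | cons y rs => exact (pv_pre_cons h).1

-- the main invariant: folding B's step over the remaining tokens, provided the
-- accumulator's last element cannot merge with the next token, appends exactly A's output
theorem pv_main (ts : List String) :
    ∀ acc : List String, Pre_normalize_ops_py ts →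
    (∀ x, acc.getLast? = some x → ∀ t, ts.head? = some t →
        ¬ (PySem.Str.upper x ++ PySem.Str.upper t = "<=" ∨
           PySem.Str.upper x ++ PySem.Str.upper t = ">=" ∨
           PySem.Str.upper x ++ PySem.Str.upper t = "<>")) →
    ts.foldl pvStepB acc = acc ++ normalize_ops_py ts := by
  induction ts using normalize_ops_py.induct with
  | case1 =>
      intro acc _ _
      simp [normalize_ops_py]
  | case2 t =>
      intro acc _ hblk
      have hstep : pvStepB acc t = acc ++ [t] := by
        unfold pvStepB
        cases hl : acc.getLast? with
        | none => rfl
        | some x =>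
            have := hblk x hl t rfl
            simp only []
            rw [if_neg this]
      simp [normalize_ops_py, List.foldl, hstep]
  | case3 t nxt rest hcond ih =>
      intro acc hpre hblk
      obtain ⟨hpre', _, h3⟩ := pv_pre_cons hpre
      have hprerest : Pre_normalize_ops_py rest := pv_pre_tail hpre'
      obtain ⟨hnxt, hpair⟩ := hcond
      have hstep : pvStepB acc t = acc ++ [t] := by
        unfold pvStepB
        cases hl : acc.getLast? with
        | none => rfl
        | some x =>
            have := hblk x hl t rfl
            simp only []
            rw [if_neg this]
      have hstep2 : pvStepB (acc ++ [t]) nxt =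
          acc ++ [PySem.Str.upper t ++ PySem.Str.upper nxt] := by
        unfold pvStepB
        rw [pv_getLast?_concat]
        simp only []
        rw [if_pos hpair, List.dropLast_concat]
      have hblk' : ∀ x, (acc ++ [PySem.Str.upper t ++ PySem.Str.upper nxt]).getLast? = some x →
          ∀ t', rest.head? = some t' →
          ¬ (PySem.Str.upper x ++ PySem.Str.upper t' = "<=" ∨
             PySem.Str.upper x ++ PySem.Str.upper t' = ">=" ∨
             PySem.Str.upper x ++ PySem.Str.upper t' = "<>") := by
        intro x hx t' hh
        rw [pv_getLast?_concat] at hx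
        cases hx
        have ht' : t' ≠ "" := h3 t' hh hpair
        exact pv_blocked _ t' hpair ht'
      calc (t :: nxt :: rest).foldl pvStepB acc
          = rest.foldl pvStepB (pvStepB (pvStepB acc t) nxt) := rfl
        _ = rest.foldl pvStepB (acc ++ [PySem.Str.upper t ++ PySem.Str.upper nxt]) := by
              rw [hstep, hstep2]
        _ = (acc ++ [PySem.Str.upper t ++ PySem.Str.upper nxt]) ++ normalize_ops_py rest :=
              ih _ hprerest hblk'
        _ = acc ++ normalize_ops_py (t :: nxt :: rest) := by
              rw [normalize_ops_py, if_pos ⟨hnxt, hpair⟩]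
              simp
  | case4 t nxt rest hcond ih =>
      intro acc hpre hblk
      obtain ⟨hpre', h2, _⟩ := pv_pre_cons hpre
      have hpairn : ¬ (PySem.Str.upper t ++ PySem.Str.upper nxt = "<=" ∨
           PySem.Str.upper t ++ PySem.Str.upper nxt = ">=" ∨
           PySem.Str.upper t ++ PySem.Str.upper nxt = "<>") := by
        by_cases hn : nxt = ""
        · subst hn
          intro h
          have hup : PySem.Str.upper t ++ PySem.Str.upper "" = PySem.Str.upper t := by
            have : PySem.Str.upper "" = "" := rfl
            rw [this, String.append_empty]
          rw [hup] at h
          exact h2 h rfl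
        · intro h; exact hcond ⟨hn, h⟩
      have hstep : pvStepB acc t = acc ++ [t] := by
        unfold pvStepB
        cases hl : acc.getLast? with
        | none => rfl
        | some x =>
            have := hblk x hl t rfl
            simp only []
            rw [if_neg this]
      have hblk' : ∀ x, (acc ++ [t]).getLast? = some x →
          ∀ t', (nxt :: rest).head? = some t' →
          ¬ (PySem.Str.upper x ++ PySem.Str.upper t' = "<=" ∨
             PySem.Str.upper x ++ PySem.Str.upper t' = ">=" ∨
             PySem.Str.upper x ++ PySem.Str.upper t' = "<>") := by
        intro x hx t' hh
        rw [pv_getLast?_concat] at hx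
        cases hx
        cases hh
        exact hpairn
      calc (t :: nxt :: rest).foldl pvStepB acc
          = (nxt :: rest).foldl pvStepB (pvStepB acc t) := rfl
        _ = (nxt :: rest).foldl pvStepB (acc ++ [t]) := by rw [hstep]
        _ = (acc ++ [t]) ++ normalize_ops_py (nxt :: rest) := ih _ hpre' hblk'
        _ = acc ++ normalize_ops_py (t :: nxt :: rest) := by
              rw [normalize_ops_py, if_neg hcond]
              simp

-- ===== VERDICT (by name: the statement is the Claim_ definition above) =====
theorem normalize_ops_py_spec : Claim_equal_normalize_ops_py := by
  intro tokens _ hpre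
  unfold Spec_normalize_ops_py normalize_ops_py_alt
  have := pv_main tokens [] hpre (by intro x hx; simp at hx)
  simp at this
  rw [this]
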